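-- pv_equiv track=rewrite | github.com/Dean20030514/Renpy-Translator | src/renpy_tools/utils/common.py | is_asset_path
-- ===== SOURCE A (Python) =====
-- ASSET_EXTS = (
--     ".png", ".jpg", ".jpeg", ".gif", ".webp", ".bmp",  # 图片
--     ".mp3", ".ogg", ".wav", ".flac", ".m4a",  # 音频
--     ".mp4", ".webm", ".avi", ".mkv",  # 视频
--     ".ttf", ".otf", ".woff", ".woff2",  # 字体
--     ".json", ".yaml", ".yml", ".xml",  # 数据
-- )
--
-- def is_asset_path(text: str) -> bool:
--     """检查文本是否为资源路径
--
--     Args: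
--         text: 输入文本
--
--     Returns:
--         是否为资源路径
--     """
--     text_lower = text.lower().strip()
--     # 检查扩展名
--     for ext in ASSET_EXTS:
--         if text_lower.endswith(ext):
--             return True
--     # 检查路径分隔符
--     if "/" in text or "\\" in text:
--         return True
--     return False
-- ===== SOURCE B (Python) =====
-- ASSET_EXT_SET = frozenset((
--     ".png", ".jpg", ".jpeg", ".gif", ".webp", ".bmp",
--     ".mp3", ".ogg", ".wav", ".flac", ".m4a",
--     ".mp4", ".webm", ".avi", ".mkv",
--     ".ttf", ".otf", ".woff", ".woff2",
--     ".json", ".yaml", ".yml", ".xml",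
-- ))
--
--
-- def is_asset_path(text: str) -> bool:
--     """Check whether the text looks like an asset file path."""
--     text_lower = text.lower().strip()
--     idx = text_lower.rfind(".")
--     if idx != -1 and text_lower[idx:] in ASSET_EXT_SET:
--         return True
--     return "/" in text or "\\" in text
-- ===== Notes on version B (the rewrite author's own statement) =====
-- stated objective: idiomatic
-- what changed: Replaces the loop over all 23 extensions doing endswith each with a single rfind of the last dot plus one O(1) frozenset lookup of the extracted extension (valid because every extension contains exactly one dot).
import Mathlib
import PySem

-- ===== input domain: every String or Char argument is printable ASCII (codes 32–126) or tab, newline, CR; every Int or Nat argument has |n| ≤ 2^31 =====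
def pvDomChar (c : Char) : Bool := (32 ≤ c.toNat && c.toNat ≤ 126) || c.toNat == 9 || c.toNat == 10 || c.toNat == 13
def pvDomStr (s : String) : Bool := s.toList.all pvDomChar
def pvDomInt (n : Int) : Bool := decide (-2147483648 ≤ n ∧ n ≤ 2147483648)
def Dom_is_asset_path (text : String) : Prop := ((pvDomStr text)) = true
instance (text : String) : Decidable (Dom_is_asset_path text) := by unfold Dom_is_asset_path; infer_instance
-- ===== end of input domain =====

-- B replaces A's loop of endswith checks over all 23 extensions by one rfind of the
-- last dot plus a single set lookup of the extracted extension (idiomatic; same cost class).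


-- ===== PORT A =====
def assetExts : List String :=
  [".png", ".jpg", ".jpeg", ".gif", ".webp", ".bmp",
   ".mp3", ".ogg", ".wav", ".flac", ".m4a",
   ".mp4", ".webm", ".avi", ".mkv",
   ".ttf", ".otf", ".woff", ".woff2",
   ".json", ".yaml", ".yml", ".xml"]

-- the 'for ext in ASSET_EXTS: if text_lower.endswith(ext): return True' loop
def extLoop (tl : String) : List String → Bool
  | [] => false
  | ext :: rest => if PySem.Str.endswith tl ext then true else extLoop tl rest

def is_asset_path (text : String) : Bool :=
  let text_lower := PySem.Str.strip (PySem.Str.lower text)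
  if extLoop text_lower assetExts then true
  else if PySem.Str.isIn "/" text || PySem.Str.isIn "\\" text then true
  else false

-- ===== PORT B =====
def assetExtSet : PySem.Set String := PySem.Set.ofList assetExts

def is_asset_path_alt (text : String) : Bool :=
  let text_lower := PySem.Str.strip (PySem.Str.lower text)
  let idx := PySem.Str.rfind text_lower "."
  if idx != -1 && assetExtSet.contains (PySem.Str.slice text_lower (some idx) none) then true
  else PySem.Str.isIn "/" text || PySem.Str.isIn "\\" text

-- ===== PRECONDITION & SPEC =====
def Spec_is_asset_path (text : String) (out : Bool) : Prop := out = is_asset_path_alt text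
instance (text : String) (out : Bool) : Decidable (Spec_is_asset_path text out) := by unfold Spec_is_asset_path; infer_instance

-- ===== CLAIM (what is proved, stated in full; the proofs are below) =====
def Claim_equal_is_asset_path : Prop := ∀ (text : String), Dom_is_asset_path text → Spec_is_asset_path text (is_asset_path text)

-- ===== LEMMAS AND PROOFS =====

-- extension loop = "some extension is a suffix"
theorem extLoop_iff (tl : String) (exts : List String) :
    extLoop tl exts = true ↔ ∃ ext ∈ exts, ext.toList <:+ tl.toList := by
  induction exts with
  | nil => simp [extLoop]
  | cons e rest ih =>
    constructor
    · intro h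
      rw [extLoop] at h
      split_ifs at h with he
      · exact ⟨e, List.mem_cons_self,
          (PySem.Chars.endswith_iff _ _).mp (by rwa [← PySem.Str.endswith_eq])⟩
      · obtain ⟨x, hx, hs⟩ := ih.mp h
        exact ⟨x, List.mem_cons_of_mem _ hx, hs⟩
    · rintro ⟨x, hx, hs⟩
      rw [extLoop]
      cases List.mem_cons.mp hx with
      | inl hxe =>
        subst hxe
        rw [if_pos (by rw [PySem.Str.endswith_eq]; exact (PySem.Chars.endswith_iff _ _).mpr hs)]
      | inr hxr =>
        split_ifs with he
        · rfl
        · exact ih.mpr ⟨x, hxr, hs⟩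

-- ['.'] is a prefix of l.drop i  ↔  l[i]? = some '.'
theorem dot_prefix_iff (l : List Char) (i : Nat) :
    ['.'].isPrefixOf (l.drop i) = true ↔ l[i]? = some '.' := by
  rw [show l[i]? = (l.drop i)[0]? by simp]
  cases h : l.drop i with
  | nil => simp [List.isPrefixOf]
  | cons c t => simp; exact eq_comm

-- one-step unfolding of rfind.go at a successor counter
theorem go_succ (l : List Char) (k : Nat) :
    PySem.Chars.rfind.go l ['.'] (k+1) =
      if ['.'].isPrefixOf (List.drop (k+1) l) = true then ((k+1 : Nat) : Int)
      else PySem.Chars.rfind.go l ['.'] k := rfl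

-- rfind.go returns j when l[j] = '.' and no dot occurs at an index in (j, k]
theorem go_eq_of (l : List Char) (j k : Nat) (hjk : j ≤ k)
    (hj : l[j]? = some '.')
    (hhigh : ∀ i, j < i → i ≤ k → l[i]? ≠ some '.') :
    PySem.Chars.rfind.go l ['.'] k = (j : Int) := by
  induction k with
  | zero =>
    have h0 : j = 0 := Nat.le_zero.mp hjk
    subst h0
    have hpre := (dot_prefix_iff l 0).mpr hj
    rw [List.drop_zero] at hpre
    rw [show PySem.Chars.rfind.go l ['.'] 0 =
      (if ['.'].isPrefixOf l = true then (0 : Int) else -1) from rfl, if_pos hpre]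
    norm_num
  | succ k ih =>
    rw [go_succ]
    by_cases hj' : j = k + 1
    · subst hj'
      rw [if_pos ((dot_prefix_iff l (k+1)).mpr hj)]
    · have hne : l[k+1]? ≠ some '.' := hhigh (k+1) (by omega) le_rfl
      rw [if_neg (by rw [dot_prefix_iff]; exact hne)]
      exact ih (by omega) (fun i h1 h2 => hhigh i h1 (by omega))

-- rfind.go is -1 or a natural number ≤ k
theorem go_nonneg_or (l : List Char) (k : Nat) :
    PySem.Chars.rfind.go l ['.'] k = -1 ∨
      ∃ j : Nat, j ≤ k ∧ PySem.Chars.rfind.go l ['.'] k = (j : Int) := by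
  induction k with
  | zero =>
    rw [show PySem.Chars.rfind.go l ['.'] 0 =
      (if ['.'].isPrefixOf l = true then (0 : Int) else -1) from rfl]
    split
    · exact Or.inr ⟨0, le_rfl, by norm_num⟩
    · exact Or.inl rfl
  | succ k ih =>
    rw [go_succ]
    split
    · exact Or.inr ⟨k + 1, le_rfl, rfl⟩
    · rcases ih with h | ⟨j, hjk, hj⟩
      · exact Or.inl h
      · exact Or.inr ⟨j, by omega, hj⟩

-- every asset extension starts with a dot and has no further dot
theorem assetExts_shape : ∀ ext ∈ assetExts,
    ext.toList.head? = some '.' ∧ '.' ∉ ext.toList.tail := by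
  decide

-- the key characterisation: A's loop succeeds iff B's rfind-plus-lookup succeeds
theorem loop_iff_lookup (tl : String) :
    extLoop tl assetExts = true ↔
      (PySem.Str.rfind tl "." != -1 &&
        assetExtSet.contains (PySem.Str.slice tl (some (PySem.Str.rfind tl ".")) none)) = true := by
  have hr : PySem.Str.rfind tl "." = PySem.Chars.rfind.go tl.toList ['.'] tl.toList.length := by
    rw [PySem.Str.rfind_eq]; rfl
  constructor
  · intro h
    obtain ⟨ext, hmem, hsuf⟩ := (extLoop_iff tl assetExts).mp h
    obtain ⟨hhd, hnd⟩ := assetExts_shape ext hmem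
    obtain ⟨w, hew⟩ : ∃ w, ext.toList = '.' :: w := by
      cases hE : ext.toList with
      | nil => rw [hE] at hhd; simp at hhd
      | cons c t =>
        rw [hE] at hhd
        simp at hhd
        exact ⟨t, by rw [hhd]⟩
    have hw : '.' ∉ w := by rw [hew] at hnd; exact hnd
    obtain ⟨p, hp⟩ := hsuf
    have hgo : PySem.Chars.rfind.go tl.toList ['.'] tl.toList.length = (p.length : Int) := by
      apply go_eq_of
      · have : tl.toList.length = p.length + ext.toList.length := by rw [← hp]; simp
        omega
      · rw [← hp, hew]; simp
      · intro i h1 h2 hc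
        rw [← hp, hew] at hc
        have hlen : (p ++ '.' :: w).length = p.length + (w.length + 1) := by simp
        have hi : i - p.length - 1 < w.length := by
          by_contra hbig
          rw [not_lt] at hbig
          rw [List.getElem?_eq_none (by rw [hlen]; omega)] at hc
          simp at hc
        have hswap : (p ++ '.' :: w)[i]? = w[i - p.length - 1]? := by
          rw [List.getElem?_append_right (by omega)]
          rw [show i - p.length = (i - p.length - 1) + 1 by omega]
          simp
        rw [hswap, List.getElem?_eq_getElem hi] at hc
        exact hw ((Option.some.injEq _ _).mp hc ▸ List.getElem_mem hi)
    have hrf : PySem.Str.rfind tl "." = (p.length : Int) := hr.trans hgo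
    rw [hrf]
    have hslice : (PySem.Str.slice tl (some ((p.length : Nat) : Int)) none).toList = ext.toList := by
      rw [PySem.Str.toList_slice, PySem.Chars.slice_eq_listSlice,
        PySem.List.slice_from _ (by positivity)]
      simp only [Int.toNat_natCast]
      rw [← hp, hew, List.drop_left]
    have hseq : PySem.Str.slice tl (some ((p.length : Nat) : Int)) none = ext :=
      String.toList_inj.mp hslice
    rw [hseq]
    simp only [Bool.and_eq_true, bne_iff_ne]
    refine ⟨by intro hc; omega, ?_⟩
    exact (PySem.Set.contains_iff _ _).mpr ((PySem.Set.mem_ofList _ _).mpr hmem)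
  · intro h
    simp only [Bool.and_eq_true, bne_iff_ne] at h
    obtain ⟨hne, hcon⟩ := h
    have hmem : PySem.Str.slice tl (some (PySem.Str.rfind tl ".")) none ∈ assetExts :=
      (PySem.Set.mem_ofList _ _).mp ((PySem.Set.contains_iff _ _).mp hcon)
    apply (extLoop_iff tl assetExts).mpr
    refine ⟨_, hmem, ?_⟩
    rw [PySem.Str.toList_slice, PySem.Chars.slice_eq_listSlice]
    rcases go_nonneg_or tl.toList tl.toList.length with h0 | ⟨j, _, hj⟩
    · exact absurd (hr.trans h0) hne
    · rw [hr, hj, PySem.List.slice_from _ (by positivity)]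
      exact List.drop_suffix _ _

-- ===== VERDICT (by name: the statement is the Claim_ definition above) =====
theorem is_asset_path_spec : Claim_equal_is_asset_path := by
  intro text _
  unfold Spec_is_asset_path is_asset_path is_asset_path_alt
  by_cases h : extLoop (PySem.Str.strip (PySem.Str.lower text)) assetExts = true
  · rw [if_pos h, if_pos ((loop_iff_lookup _).mp h)]
  · rw [if_neg h, if_neg (fun hc => h ((loop_iff_lookup _).mpr hc))]
    simp
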